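-- pv_equiv track=rewrite | github.com/tram-tr/2023-google-codejam-farewell | colliding_encoding.py | colliding_encoding
-- ===== SOURCE A (Python) =====
-- from typing import List, Tuple
--
-- def colliding_encoding(T: int, test_cases: List[Tuple[List[str], int, List[str]]]) -> List[str]:
--     result = []
--     for t, (D, N, S) in enumerate(test_cases, 1):
--         encoded_words = set()
--         collision = False
--         for word in S:
--             encoded_word = ''.join(D[ord(c) - ord('A')] for c in word)
--             if (encoded_word in encoded_words):
--                 collision = True
--                 break
--             else:
--                 encoded_words.add(encoded_word)
--         result.append(f"Case #{t}: {'YES' if collision else 'NO'}")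
--
--     return result
-- ===== SOURCE B (Python) =====
-- from typing import List, Tuple
--
-- def colliding_encoding(T: int, test_cases: List[Tuple[List[str], int, List[str]]]) -> List[str]:
--     def verdict(t, D, N, S):
--         encoded = sorted(''.join(D[ord(c) - ord('A')] for c in word) for word in S)
--         dup = any(x == y for x, y in zip(encoded, encoded[1:]))
--         return f"Case #{t}: {'YES' if dup else 'NO'}"
--     return [verdict(t, D, N, S) for t, (D, N, S) in enumerate(test_cases, 1)]
-- ===== Notes on version B (the rewrite author's own statement) =====
-- stated objective: alternative
-- what changed: Duplicate-encoding detection by building a set with an early break is replaced by encoding every word, sorting the encodings and scanning adjacent pairs for an equal neighbour (sort-then-scan instead of hash-set membership), with the output built as a comprehension over enumerate instead of an append loop.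
-- outside the precondition, e.g. on colliding_encoding(1, [(['7'], 2, ['A', 'A', 'B'])]): A returns ['Case #1: YES'], B raises IndexError
import Mathlib
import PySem

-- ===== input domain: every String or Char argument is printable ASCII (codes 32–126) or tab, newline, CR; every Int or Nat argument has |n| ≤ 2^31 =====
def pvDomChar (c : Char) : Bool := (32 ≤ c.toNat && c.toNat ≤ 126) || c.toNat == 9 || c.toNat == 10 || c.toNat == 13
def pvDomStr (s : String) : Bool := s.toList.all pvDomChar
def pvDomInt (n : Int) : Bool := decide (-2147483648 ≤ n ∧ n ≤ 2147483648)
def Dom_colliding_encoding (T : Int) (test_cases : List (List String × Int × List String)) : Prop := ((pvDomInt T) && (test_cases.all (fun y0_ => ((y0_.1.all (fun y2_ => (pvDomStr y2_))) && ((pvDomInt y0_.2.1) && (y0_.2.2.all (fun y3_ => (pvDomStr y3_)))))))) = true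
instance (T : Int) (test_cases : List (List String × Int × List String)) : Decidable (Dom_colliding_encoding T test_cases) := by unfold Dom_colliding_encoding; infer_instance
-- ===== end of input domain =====

-- B replaces A's hash-set duplicate detection (with early break) by sort-then-adjacent-scan over
-- all encoded words, built as a map over enumerate; an alternative decomposition, not claimed faster.


-- ===== PORT A =====
-- encoded_word = ''.join(D[ord(c) - ord('A')] for c in word); pyGetD is exact under Pre_ (A raises IndexError where pyGet? = none)
def ceEncA (D : List String) (w : String) : String :=
  PySem.Str.join "" (w.toList.map (fun c => PySem.List.pyGetD D ((c.toNat : Int) - 65) ""))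

-- the inner 'for word in S' loop with the set 'encoded_words' and the early 'break' setting collision
def ceLoopA (D : List String) : List String → PySem.Set String → Bool
  | [], _ => false
  | w :: rest, seen =>
    let e := ceEncA D w
    if PySem.Set.contains seen e then true
    else ceLoopA D rest (PySem.Set.add seen e)

def colliding_encoding (T : Int) (test_cases : List (List String × Int × List String)) : List String :=
  (PySem.List.enumerate test_cases 1).foldl
    (fun result p =>
      let collision := ceLoopA p.2.1 p.2.2.2 PySem.Set.empty
      result ++ ["Case #" ++ PySem.Int.toStr p.1 ++ ": " ++ (if collision then "YES" else "NO")])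
    []

-- ===== PORT B =====
-- B's word encoding is the very same Python expression as A's, so its port shares the helper ceEncA
-- any(x == y for x, y in zip(encoded, encoded[1:]))
def ceAdjDup (l : List String) : Bool := (l.zip l.tail).any (fun p => p.1 == p.2)

def ceVerdict (t : Int) (D : List String) (N : Int) (S : List String) : String :=
  let encoded := PySem.List.sorted (S.map (ceEncA D)) (fun x => x) false
  let dup := ceAdjDup encoded
  "Case #" ++ PySem.Int.toStr t ++ ": " ++ (if dup then "YES" else "NO")

def colliding_encoding_alt (T : Int) (test_cases : List (List String × Int × List String)) : List String :=
  (PySem.List.enumerate test_cases 1).map (fun p => ceVerdict p.1 p.2.1 p.2.2.1 p.2.2.2)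

-- ===== PRECONDITION & SPEC =====
-- Pre_ excludes the inputs where indexing D[ord(c)-ord('A')] would raise IndexError; it is slightly
-- narrower than A's return domain: A may hit a collision and break before ever indexing a bad later
-- word (it returns YES there), while B, which encodes every word, raises — those inputs are excluded.
def Pre_colliding_encoding (T : Int) (test_cases : List (List String × Int × List String)) : Prop :=
  (test_cases.all (fun tc => tc.2.2.all (fun w => w.toList.all (fun c =>
      decide (PySem.Raise.InRange tc.1.length ((c.toNat : Int) - 65)))))) = true
instance (T : Int) (test_cases : List (List String × Int × List String)) : Decidable (Pre_colliding_encoding T test_cases) := by unfold Pre_colliding_encoding; infer_instance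

def pvWitness_colliding_encoding : Int × (List (List String × Int × List String)) :=
  (1, [(["7", "7"], 2, ["A", "B"])])

def Spec_colliding_encoding (T : Int) (test_cases : List (List String × Int × List String)) (out : List String) : Prop := out = colliding_encoding_alt T test_cases
instance (T : Int) (test_cases : List (List String × Int × List String)) (out : List String) : Decidable (Spec_colliding_encoding T test_cases out) := by unfold Spec_colliding_encoding; infer_instance

-- ===== CLAIM (what is proved, stated in full; the proofs are below) =====
def Claim_equal_colliding_encoding : Prop := ∀ (T : Int) (test_cases : List (List String × Int × List String)), Dom_colliding_encoding T test_cases → Pre_colliding_encoding T test_cases → Spec_colliding_encoding T test_cases (colliding_encoding T test_cases)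

-- ===== LEMMAS AND PROOFS =====

-- A's set-loop hits an existing member exactly when the encodings (plus the seed set) have a repeat.
lemma ceLoopA_iff (D : List String) (ws : List String) (seen : PySem.Set String) :
    ceLoopA D ws seen = true ↔
      (∃ e ∈ ws.map (ceEncA D), e ∈ seen) ∨ ¬ (ws.map (ceEncA D)).Nodup := by
  induction ws generalizing seen with
  | nil => simp [ceLoopA]
  | cons w rest ih =>
    by_cases hm : ceEncA D w ∈ seen
    · have hc : PySem.Set.contains seen (ceEncA D w) = true := (PySem.Set.contains_iff _ _).mpr hm
      simp only [ceLoopA, hc, if_true, true_iff]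
      exact Or.inl ⟨ceEncA D w, by simp, hm⟩
    · have hc : PySem.Set.contains seen (ceEncA D w) = false :=
        Bool.eq_false_iff.mpr (fun h => hm ((PySem.Set.contains_iff _ _).mp h))
      simp only [ceLoopA, hc, Bool.false_eq_true, if_false, ih]
      simp only [List.map_cons, List.nodup_cons, List.mem_cons, PySem.Set.mem_add]
      constructor
      · rintro (⟨e, he, hmem | heq⟩ | hnd)
        · exact Or.inl ⟨e, Or.inr he, hmem⟩
        · exact Or.inr (fun h => h.1 (heq ▸ he))
        · exact Or.inr (fun h => hnd h.2)
      · rintro (⟨e, he | he, hmem⟩ | hnd)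
        · exact absurd (he ▸ hmem) hm
        · exact Or.inl ⟨e, he, Or.inl hmem⟩
        · by_cases hin : ceEncA D w ∈ rest.map (ceEncA D)
          · exact Or.inl ⟨ceEncA D w, hin, Or.inr rfl⟩
          · exact Or.inr (fun h => hnd ⟨hin, h⟩)

-- on a ≤-sorted list, an equal adjacent pair exists exactly when the list has a repeat
lemma ceAdjDup_iff (l : List String) (h : l.Pairwise (· ≤ ·)) :
    ceAdjDup l = true ↔ ¬ l.Nodup := by
  induction l with
  | nil => simp [ceAdjDup]
  | cons x t ih =>
    cases t with
    | nil => simp [ceAdjDup]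
    | cons y t' =>
      have hp : (y :: t').Pairwise (· ≤ ·) := (List.pairwise_cons.mp h).2
      have hxle : ∀ z ∈ y :: t', x ≤ z := (List.pairwise_cons.mp h).1
      have hstep : ceAdjDup (x :: y :: t') = ((x == y) || ceAdjDup (y :: t')) := rfl
      have hmem : x ∈ y :: t' ↔ x = y := by
        constructor
        · intro hx
          rcases List.mem_cons.mp hx with hxy | hx'
          · exact hxy
          · exact le_antisymm (hxle y (by simp)) ((List.pairwise_cons.mp hp).1 x hx')
        · intro hxy; simp [hxy]
      rw [hstep]
      simp only [Bool.or_eq_true, beq_iff_eq, ih hp, List.nodup_cons, hmem]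
      tauto

-- the two per-case collision booleans agree
lemma ceCase_eq (D : List String) (S : List String) :
    ceLoopA D S PySem.Set.empty = ceAdjDup (PySem.List.sorted (S.map (ceEncA D)) (fun x => x) false) := by
  have h1 : ceLoopA D S PySem.Set.empty = true ↔ ¬ (S.map (ceEncA D)).Nodup := by
    rw [ceLoopA_iff]
    simp [PySem.Set.empty]
  have hpw : (PySem.List.sorted (S.map (ceEncA D)) (fun x => x) false).Pairwise (· ≤ ·) :=
    PySem.List.sorted_pairwise (S.map (ceEncA D)) (fun x => x)
  have h2 := ceAdjDup_iff _ hpw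
  have h3 : (PySem.List.sorted (S.map (ceEncA D)) (fun x => x) false).Nodup ↔ (S.map (ceEncA D)).Nodup :=
    (PySem.List.sorted_perm (S.map (ceEncA D)) (fun x => x) false).nodup_iff
  rw [Bool.eq_iff_iff, h1, h2, h3]

-- ===== VERDICT (by name: the statement is the Claim_ definition above) =====
theorem colliding_encoding_spec : Claim_equal_colliding_encoding := by
  intro T test_cases _ _
  unfold Spec_colliding_encoding colliding_encoding colliding_encoding_alt
  rw [PySem.List.foldl_append_singleton_eq_map]
  rw [List.nil_append]
  apply List.map_congr_left
  intro p _
  show _ = ceVerdict p.1 p.2.1 p.2.2.1 p.2.2.2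
  unfold ceVerdict
  rw [ceCase_eq p.2.1 p.2.2.2]
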